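-- pv_equiv track=rewrite | github.com/futel/usage | static-gen/src/channel_year_agg.py | _latestByEvent
-- ===== SOURCE A (Python) =====
-- EPOCH = '1970-01-01T00:00:00+00:00'
--
-- def _latestByEvent(events):
--     agg = dict()
--     for event in events:
--         timestamp = event['timestamp']
--         eventName = event['event']
--         if eventName not in agg:
--             agg[eventName] = EPOCH
--         if timestamp > agg[eventName]:
--             agg[eventName] = timestamp
--     return agg
-- ===== SOURCE B (Python) =====
-- EPOCH = '1970-01-01T00:00:00+00:00'
--
-- def _latestByEvent(events):
--     # Pass 1: collect the distinct event names in first-seen order.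
--     names = []
--     for e in events:
--         if e['event'] not in names:
--             names.append(e['event'])
--     # Pass 2: for each name, the max timestamp over its events, with the EPOCH floor.
--     return {n: max([EPOCH] + [e['timestamp'] for e in events if e['event'] == n])
--             for n in names}
-- ===== Notes on version B (the rewrite author's own statement) =====
-- stated objective: alternative
-- what changed: A maintains a running-max dict in a single pass; B keeps no dict at all: it first collects the distinct event names in first-seen order into a list, then for each name rescans the events and takes max([EPOCH]+timestamps) in a dict comprehension.
import Mathlib
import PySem

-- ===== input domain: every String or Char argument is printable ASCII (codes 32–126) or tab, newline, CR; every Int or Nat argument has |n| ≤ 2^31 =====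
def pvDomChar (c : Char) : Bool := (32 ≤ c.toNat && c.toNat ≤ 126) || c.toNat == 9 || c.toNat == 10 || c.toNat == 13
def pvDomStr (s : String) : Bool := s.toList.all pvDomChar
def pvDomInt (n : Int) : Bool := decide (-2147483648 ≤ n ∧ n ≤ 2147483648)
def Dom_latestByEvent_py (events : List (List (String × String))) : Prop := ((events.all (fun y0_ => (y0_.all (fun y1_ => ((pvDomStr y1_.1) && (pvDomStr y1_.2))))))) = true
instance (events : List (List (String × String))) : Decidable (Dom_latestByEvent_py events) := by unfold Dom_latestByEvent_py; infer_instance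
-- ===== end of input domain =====

-- B replaces A's single running-max-dict pass by a dict-free two-phase scheme —
-- collect distinct names in first-seen order, then rescan the events per name and
-- take max([EPOCH]+timestamps) — a different algorithm (objective: alternative).

def pvEPOCH : String := "1970-01-01T00:00:00+00:00"

-- ===== PORT A =====
-- one loop iteration of A (events whose dict lacks 'timestamp'/'event' make Python
-- raise KeyError: the step yields none there, and Pre_ excludes those inputs)
def pvStepA (acc : Option (PySem.Dict String String)) (event : List (String × String)) :
    Option (PySem.Dict String String) :=
  acc.bind (fun agg =>
    match (PySem.Dict.mk event).get? "timestamp", (PySem.Dict.mk event).get? "event" with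
    | some timestamp, some eventName =>
        let agg := if agg.contains eventName then agg else agg.insert eventName pvEPOCH
        some (if ((agg.get? eventName).getD pvEPOCH) < timestamp
              then agg.insert eventName timestamp else agg)
    | _, _ => none)

def latestByEvent_py (events : List (List (String × String))) : List (String × String) :=
  match events.foldl pvStepA (some PySem.Dict.empty) with
  | some agg => agg.items
  | none => []

-- ===== PORT B =====
-- B's first loop: names.append(e['event']) unless already present (KeyError → none)
def pvNames (acc : Option (List String)) (event : List (String × String)) :
    Option (List String) :=
  acc.bind (fun ns =>
    ((PySem.Dict.mk event).get? "event").map (fun n =>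
      if ns.contains n then ns else ns ++ [n]))

-- the comprehension [e['timestamp'] for e in events if e['event'] == n]; an event
-- missing a key is skipped here (inside Pre_ every event carries both keys, so this
-- branch never fires on admitted inputs)
def pvStampsFor (events : List (List (String × String))) (n : String) : List String :=
  events.foldr (fun e acc =>
    match (PySem.Dict.mk e).get? "event", (PySem.Dict.mk e).get? "timestamp" with
    | some en, some t => if en == n then t :: acc else acc
    | _, _ => acc) []

def latestByEvent_py_alt (events : List (List (String × String))) : List (String × String) :=
  match events.foldl pvNames (some []) with
  | none => []
  | some ns =>
      ns.map (fun n =>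
        (n, (PySem.List.max? (pvEPOCH :: pvStampsFor events n) (fun y => y)).getD pvEPOCH))

-- ===== PRECONDITION & SPEC =====
-- Pre_ excludes exactly the inputs where Python A raises KeyError: an event dict
-- missing the 'timestamp' or 'event' key.
def Pre_latestByEvent_py (events : List (List (String × String))) : Prop :=
  (events.all (fun e => (e.map Prod.fst).contains "timestamp"
                     && (e.map Prod.fst).contains "event")) = true

instance (events : List (List (String × String))) : Decidable (Pre_latestByEvent_py events) := by
  unfold Pre_latestByEvent_py; infer_instance

def pvWitness_latestByEvent_py : (List (List (String × String))) :=
  [[("event", "dialout"), ("timestamp", "2020-01-02T03:04:05+00:00")],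
   [("event", "dialout"), ("timestamp", "1960-01-02T03:04:05+00:00")]]

def Spec_latestByEvent_py (events : List (List (String × String))) (out : List (String × String)) : Prop := out = latestByEvent_py_alt events
instance (events : List (List (String × String))) (out : List (String × String)) : Decidable (Spec_latestByEvent_py events out) := by unfold Spec_latestByEvent_py; infer_instance

-- ===== CLAIM (what is proved, stated in full; the proofs are below) =====
def Claim_equal_latestByEvent_py : Prop := ∀ (events : List (List (String × String))), Dom_latestByEvent_py events → Pre_latestByEvent_py events → Spec_latestByEvent_py events (latestByEvent_py events)

-- ===== LEMMAS AND PROOFS =====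

-- proof-only intermediate: the grouping fold that both ports are related to
def pvStepB (acc : Option (PySem.Dict String (List String))) (event : List (String × String)) :
    Option (PySem.Dict String (List String)) :=
  acc.bind (fun groups =>
    match (PySem.Dict.mk event).get? "event", (PySem.Dict.mk event).get? "timestamp" with
    | some name, some ts => some (groups.modify name [] (fun l => l ++ [ts]))
    | _, _ => none)

def pvRed (ts : List String) : String := ts.foldl max pvEPOCH

def pvRedP (p : String × List String) : String × String := (p.1, pvRed p.2)

theorem pv_get?_mk_map (l : List (String × List String)) (x : String) :
    (PySem.Dict.mk (l.map pvRedP)).get? x = ((PySem.Dict.mk l).get? x).map pvRed := by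
  induction l with
  | nil => simp [PySem.Dict.get?]
  | cons p rest ih =>
      obtain ⟨k, v⟩ := p
      simp only [List.map_cons, pvRedP, PySem.Dict.get?_mk_cons]
      split <;> simp [ih]

theorem pv_contains_mk_map (l : List (String × List String)) (x : String) :
    (PySem.Dict.mk (l.map pvRedP)).contains x = (PySem.Dict.mk l).contains x := by
  rw [PySem.Dict.contains_eq_isSome_get?, PySem.Dict.contains_eq_isSome_get?, pv_get?_mk_map]
  cases (PySem.Dict.mk l).get? x <;> simp

theorem pv_mk_items (g : PySem.Dict String (List String)) : PySem.Dict.mk g.items = g := rfl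

-- one step of A, started from the reduced image of g, lands on the reduced image of
-- one grouping step
theorem pv_step_eq (g : PySem.Dict String (List String)) (n t : String)
    (hnd : g.keys.Nodup) :
    (let agg := PySem.Dict.mk (g.items.map pvRedP)
     let agg := if agg.contains n then agg else agg.insert n pvEPOCH
     (if ((agg.get? n).getD pvEPOCH) < t then agg.insert n t else agg))
      = PySem.Dict.mk ((g.insert n (g.getD n [] ++ [t])).items.map pvRedP) := by
  have hc : (PySem.Dict.mk (g.items.map pvRedP)).contains n = g.contains n := by
    rw [pv_contains_mk_map, pv_mk_items]
  by_cases h : g.contains n = true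
  · -- existing key: A updates in place iff strictly greater; the group gets an append
    obtain ⟨ts, hts⟩ : ∃ ts, g.get? n = some ts := by
      have := PySem.Dict.contains_eq_isSome_get? g n
      rw [h] at this
      exact Option.isSome_iff_exists.mp this.symm
    have hgd : g.getD n [] = ts := PySem.Dict.getD_of_get?_eq_some _ _ hts
    have hget : (PySem.Dict.mk (g.items.map pvRedP)).get? n = some (pvRed ts) := by
      rw [pv_get?_mk_map, pv_mk_items, hts]; rfl
    have hitems : (g.insert n (g.getD n [] ++ [t])).items
        = g.items.map (fun p => if p.1 == n then (n, ts ++ [t]) else p) := by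
      rw [hgd]; exact PySem.Dict.items_insert_of_contains _ _ h
    simp only [hc, h, if_pos, hget, Option.getD_some]
    apply PySem.Dict.ext
    rw [hitems, List.map_map]
    by_cases hlt : pvRed ts < t
    · rw [if_pos hlt]
      rw [PySem.Dict.items_insert_of_contains _ t (by rw [hc]; exact h), List.map_map]
      apply List.map_congr_left
      intro p _
      by_cases hp : p.1 == n
      · simp only [Function.comp, pvRedP, hp, if_pos]
        have : pvRed (ts ++ [t]) = t := by
          simp only [pvRed, List.foldl_append, List.foldl_cons, List.foldl_nil]
          exact max_eq_right (le_of_lt hlt)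
        simp [this]
      · simp [Function.comp, pvRedP, hp]
    · rw [if_neg hlt]
      apply List.map_congr_left
      intro p hp
      by_cases hpn : p.1 == n
      · have hpn' : p.1 = n := by simpa using hpn
        have hg : g.get? p.1 = some p.2 := by
          refine PySem.Dict.get?_of_mem_items g ?_ hnd
          exact (by cases p; exact hp)
        rw [hpn', hts] at hg
        have hpts : p.2 = ts := by injection hg with h0; exact h0.symm
        have : pvRed (ts ++ [t]) = pvRed ts := by
          simp only [pvRed, List.foldl_append, List.foldl_cons, List.foldl_nil]
          exact max_eq_left (le_of_not_gt hlt)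
        simp [Function.comp, pvRedP, hpn', hpts, this]
      · simp [Function.comp, pvRedP, hpn]
  · -- fresh key: A appends (n, EPOCH) then maybe overwrites; the group becomes [t]
    have h' : g.contains n = false := by simpa using h
    have hgd : g.getD n [] = [] := PySem.Dict.getD_of_not_contains _ _ h'
    have hcd : (PySem.Dict.mk (g.items.map pvRedP)).contains n = false := by rw [hc]; exact h'
    simp only [hc, h', Bool.false_eq_true, ite_false]
    rw [PySem.Dict.get?_insert_self, Option.getD_some]
    apply PySem.Dict.ext
    rw [hgd, PySem.Dict.items_insert_of_not_contains _ _ h', List.map_append, List.map_cons,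
      List.map_nil]
    have hred : pvRed [t] = max pvEPOCH t := by
      simp [pvRed]
    by_cases hlt : pvEPOCH < t
    · rw [if_pos hlt, PySem.Dict.insert_insert_self,
        PySem.Dict.items_insert_of_not_contains _ _ hcd]
      simp [pvRedP, hred, max_eq_right (le_of_lt hlt)]
    · rw [if_neg hlt, PySem.Dict.items_insert_of_not_contains _ _ hcd]
      simp [pvRedP, hred, max_eq_left (le_of_not_gt hlt)]

theorem pv_foldA_none (events : List (List (String × String))) :
    events.foldl pvStepA none = none := by
  induction events with
  | nil => rfl
  | cons e rest ih => simpa [pvStepA] using ih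

theorem pv_foldB_none (events : List (List (String × String))) :
    events.foldl pvStepB none = none := by
  induction events with
  | nil => rfl
  | cons e rest ih => simpa [pvStepB] using ih

-- invariant: A's running dict is, at every step, the reduced image of the groups
theorem pv_fold_eq (events : List (List (String × String))) :
    ∀ (g : PySem.Dict String (List String)), g.keys.Nodup →
      events.foldl pvStepA (some (PySem.Dict.mk (g.items.map pvRedP)))
        = (events.foldl pvStepB (some g)).map
            (fun g' => PySem.Dict.mk (g'.items.map pvRedP)) := by
  induction events with
  | nil => intro g _; rfl
  | cons e rest ih =>
      intro g hnd
      simp only [List.foldl_cons]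
      cases hT : (PySem.Dict.mk e).get? "timestamp" with
      | none =>
          cases hE : (PySem.Dict.mk e).get? "event" with
          | none =>
              simp only [pvStepA, pvStepB, Option.bind_some, hT, hE]
              rw [pv_foldA_none, pv_foldB_none]; rfl
          | some n =>
              simp only [pvStepA, pvStepB, Option.bind_some, hT, hE]
              rw [pv_foldA_none, pv_foldB_none]; rfl
      | some t =>
          cases hE : (PySem.Dict.mk e).get? "event" with
          | none =>
              simp only [pvStepA, pvStepB, Option.bind_some, hT, hE]
              rw [pv_foldA_none, pv_foldB_none]; rfl
          | some n =>
              have hstep : pvStepA (some (PySem.Dict.mk (g.items.map pvRedP))) e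
                  = some (PySem.Dict.mk
                      ((g.insert n (g.getD n [] ++ [t])).items.map pvRedP)) := by
                simp only [pvStepA, Option.bind_some, hT, hE]
                rw [← pv_step_eq g n t hnd]
              have hstepB : pvStepB (some g) e
                  = some (g.insert n (g.getD n [] ++ [t])) := by
                simp only [pvStepB, Option.bind_some, hT, hE]
                rfl
              rw [hstep, hstepB]
              exact ih (g.insert n (g.getD n [] ++ [t]))
                (PySem.Dict.nodup_keys_insert g _ _ hnd)

-- Pre_'s membership test implies the dict lookup succeeds
theorem pv_pre_get (e : List (String × String)) (k : String)
    (h : (e.map Prod.fst).contains k = true) :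
    ((PySem.Dict.mk e).get? k).isSome := by
  induction e with
  | nil => simp at h
  | cons p rest ih =>
      rw [PySem.Dict.get?_mk_cons]
      by_cases hp : p.1 == k
      · simp [hp]
      · have hk : (k == p.1) = false := by
          rcases Bool.eq_false_iff.mpr hp with _
          exact beq_eq_false_iff_ne.mpr (fun he => hp (beq_iff_eq.mpr he.symm))
        simp only [List.map_cons, List.contains_cons, hk, Bool.false_or] at h
        simp [hp, ih h]

-- the key bridge: the grouping fold's items are exactly B's names list paired with
-- B's per-name timestamp comprehension (both running from a common start g)
theorem pv_groupB_names (events : List (List (String × String))) :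
    ∀ (g : PySem.Dict String (List String)), g.keys.Nodup →
      (∀ e ∈ events, ((PySem.Dict.mk e).get? "event").isSome
                   ∧ ((PySem.Dict.mk e).get? "timestamp").isSome) →
      (events.foldl pvStepB (some g)).map PySem.Dict.items
        = (events.foldl pvNames (some g.keys)).map
            (List.map (fun n => (n, g.getD n [] ++ pvStampsFor events n))) := by
  induction events with
  | nil =>
      intro g hnd _
      simp only [List.foldl_nil, Option.map_some]
      rw [PySem.Dict.items_eq_map_keys g hnd []]
      simp [pvStampsFor]
  | cons e rest ih =>
      intro g hnd hk
      obtain ⟨en, hE⟩ := Option.isSome_iff_exists.mp (hk e (by simp)).1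
      obtain ⟨t, hT⟩ := Option.isSome_iff_exists.mp (hk e (by simp)).2
      have hrest : ∀ e' ∈ rest, ((PySem.Dict.mk e').get? "event").isSome
                   ∧ ((PySem.Dict.mk e').get? "timestamp").isSome :=
        fun e' he' => hk e' (by simp [he'])
      simp only [List.foldl_cons]
      have hstepB : pvStepB (some g) e = some (g.insert en (g.getD en [] ++ [t])) := by
        simp only [pvStepB, Option.bind_some, hE, hT]; rfl
      have hstepN : pvNames (some g.keys) e
          = some (if g.keys.contains en then g.keys else g.keys ++ [en]) := by
        simp [pvNames, hE]
      have hkeys : (g.insert en (g.getD en [] ++ [t])).keys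
          = if g.keys.contains en then g.keys else g.keys ++ [en] := by
        by_cases hc : g.contains en = true
        · have : g.keys.contains en = true := by
            simpa [List.contains_iff_mem] using (PySem.Dict.contains_iff_mem_keys g en).mp hc
          rw [this, if_pos rfl, PySem.Dict.keys_insert_of_contains _ _ hc]
        · have hc' : g.contains en = false := by simpa using hc
          have : g.keys.contains en = false := by
            by_contra hcon
            have : en ∈ g.keys := by
              simpa [List.contains_iff_mem] using (Bool.not_eq_false _).mp hcon
            exact hc ((PySem.Dict.contains_iff_mem_keys g en).mpr this)
          rw [this]
          simp only [Bool.false_eq_true, ite_false]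
          exact PySem.Dict.keys_insert_of_not_contains _ _ hc'
      rw [hstepB, hstepN, ← hkeys,
        ih (g.insert en (g.getD en [] ++ [t])) (PySem.Dict.nodup_keys_insert g _ _ hnd) hrest]
      have hfun : (fun n => (n, (g.insert en (g.getD en [] ++ [t])).getD n []
                      ++ pvStampsFor rest n))
          = (fun n => (n, g.getD n [] ++ pvStampsFor (e :: rest) n)) := by
        funext n
        have hsf : pvStampsFor (e :: rest) n
            = if en == n then t :: pvStampsFor rest n else pvStampsFor rest n := by
          simp only [pvStampsFor, List.foldr_cons, hE, hT]
        by_cases hn : n = en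
        · subst hn
          rw [hsf, if_pos (by simp), PySem.Dict.getD_insert_self]
          simp
        · rw [hsf, if_neg (by simpa using (Ne.symm hn)),
            PySem.Dict.getD_insert, if_neg hn]
      rw [hfun]

-- B's names fold succeeds whenever every event carries the 'event' key
theorem pv_foldNames_some (events : List (List (String × String)))
    (hk : ∀ e ∈ events, ((PySem.Dict.mk e).get? "event").isSome) :
    ∀ ns, (events.foldl pvNames (some ns)).isSome := by
  induction events with
  | nil => intro ns; simp
  | cons e rest ih =>
      intro ns
      obtain ⟨en, hE⟩ := Option.isSome_iff_exists.mp (hk e (by simp))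
      have : pvNames (some ns) e = some (if ns.contains en then ns else ns ++ [en]) := by
        simp [pvNames, hE]
      rw [List.foldl_cons, this]
      exact ih (fun e' he' => hk e' (by simp [he'])) _

-- ===== VERDICT (by name: the statement is the Claim_ definition above) =====
theorem latestByEvent_py_spec : Claim_equal_latestByEvent_py := by
  intro events _ hpre
  unfold Spec_latestByEvent_py latestByEvent_py latestByEvent_py_alt
  have hk : ∀ e ∈ events, ((PySem.Dict.mk e).get? "event").isSome
              ∧ ((PySem.Dict.mk e).get? "timestamp").isSome := by
    intro e he
    have h := (List.all_eq_true.mp hpre) e he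
    simp only [Bool.and_eq_true] at h
    exact ⟨pv_pre_get e "event" h.2, pv_pre_get e "timestamp" h.1⟩
  have h0 : (some (PySem.Dict.empty : PySem.Dict String String))
      = some (PySem.Dict.mk (((PySem.Dict.empty : PySem.Dict String (List String))).items.map pvRedP)) := rfl
  rw [h0, pv_fold_eq events PySem.Dict.empty (by simp)]
  have hmain := pv_groupB_names events PySem.Dict.empty (by simp) hk
  have hkeys0 : (PySem.Dict.empty : PySem.Dict String (List String)).keys = [] := rfl
  rw [hkeys0] at hmain
  cases hN : events.foldl pvNames (some []) with
  | none =>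
      exfalso
      have := pv_foldNames_some events (fun e he => (hk e he).1) []
      rw [hN] at this; simp at this
  | some ns =>
      rw [hN] at hmain
      cases hB : events.foldl pvStepB (some PySem.Dict.empty) with
      | none => rw [hB] at hmain; simp at hmain
      | some g' =>
          rw [hB] at hmain
          simp only [Option.map_some, Option.some.injEq] at hmain
          simp only [Option.map_some]
          rw [hmain, List.map_map]
          apply List.map_congr_left
          intro n _
          rw [PySem.List.max?_id_cons]
          simp [Function.comp, pvRedP, pvRed, PySem.Dict.getD_empty]
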